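-- pv_equiv track=rewrite | github.com/jdvcDev/jbrik | solver_core/jbrik_cube.py | dedupemovelist
-- ===== SOURCE A (Python) =====
-- def dedupemovelist(movelist):
--     dupedcount = 0
--     dedupedlist = []
--     prevmove = movelist[0]
--     iter = 0
--     for move in movelist:
--         if move == prevmove:
--             dupedcount +=1
--             prevmove = move
--         else:
--             dedupedlist.append(prevmove[:3] + dupedcount.__str__())
--             prevmove = move
--             if iter != movelist.__len__():
--                 dupedcount = 1
--         iter +=1
--
--         if iter == movelist.__len__():
--             dedupedlist.append(prevmove[:3] + dupedcount.__str__())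
--
--     return dedupedlist
-- ===== SOURCE B (Python) =====
-- def dedupemovelist(movelist):
--     out = []
--     n = len(movelist)
--     i = 0
--     while i < n:
--         move = movelist[i]
--         k = i + 1
--         while k < n and movelist[k] == move:
--             k += 1
--         out.append(move[:3] + str(k - i))
--         i = k
--     return out
-- ===== Notes on version B (the rewrite author's own statement) =====
-- stated objective: alternative
-- what changed: Replaced A's single fold that threads (dupedcount, prevmove, iter, len) state and flushes inside the loop body on the last index by an outer run-peeling loop with an inner run-length scan and list slicing, with no counters carried across runs.
-- outside the precondition, e.g. on dedupemovelist([]): A raises IndexError, B returns []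
import Mathlib
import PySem

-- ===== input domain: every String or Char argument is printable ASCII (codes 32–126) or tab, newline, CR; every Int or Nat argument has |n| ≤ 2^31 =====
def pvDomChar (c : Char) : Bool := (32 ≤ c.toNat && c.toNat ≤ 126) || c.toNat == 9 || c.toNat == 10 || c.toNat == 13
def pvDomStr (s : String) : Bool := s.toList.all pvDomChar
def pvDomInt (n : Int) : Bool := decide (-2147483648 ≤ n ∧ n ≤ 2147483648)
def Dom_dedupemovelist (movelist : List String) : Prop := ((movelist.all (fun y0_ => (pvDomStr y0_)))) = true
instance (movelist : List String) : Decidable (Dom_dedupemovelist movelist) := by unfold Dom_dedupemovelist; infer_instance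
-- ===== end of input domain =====

-- B replaces A's single fold carrying (count, prev, iter, len) state by an outer run-peeling
-- loop with an inner run-length scan; B returns [] on the empty list where A raises IndexError.

-- shared small helpers: s[:3] and str(n)
def take3 (s : String) : String := PySem.Str.slice s none (some 3)
def istr (n : Int) : String := PySem.Int.toStr n

-- ===== PORT A =====
-- one loop step of A's for-loop over (dupedcount, dedupedlist, prevmove, iter)
def stepA (len : Nat) (s : Int × List String × String × Nat) (move : String) :
    Int × List String × String × Nat :=
  let (dupedcount, dedupedlist, prevmove, iter) := s
  let (dupedcount, dedupedlist, prevmove) :=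
    if move == prevmove then
      (dupedcount + 1, dedupedlist, move)
    else
      ((if iter ≠ len then (1 : Int) else dupedcount),
       dedupedlist ++ [take3 prevmove ++ istr dupedcount],
       move)
  let iter := iter + 1
  let dedupedlist :=
    if iter = len then dedupedlist ++ [take3 prevmove ++ istr dupedcount] else dedupedlist
  (dupedcount, dedupedlist, prevmove, iter)

-- movelist[0] raises IndexError on []; Pre_ excludes that input (headD is never the result there)
def dedupemovelist (movelist : List String) : List String :=
  (movelist.foldl (stepA movelist.length) (0, [], movelist.headD "", 0)).2.1

-- ===== PORT B =====
-- inner while: advance k while k < n and movelist[k] == move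
def runLen (movelist : List String) (n : Nat) (move : String) (k : Nat) : Nat :=
  if h : k < n ∧ (movelist.getD k "" == move) = true then runLen movelist n move (k + 1) else k
termination_by n - k
decreasing_by omega

theorem runLen_ge (movelist : List String) (n : Nat) (move : String) (k : Nat) :
    k ≤ runLen movelist n move k := by
  unfold runLen
  split
  · exact le_trans (Nat.le_succ k) (runLen_ge movelist n move (k + 1))
  · exact le_refl k
termination_by n - k
decreasing_by omega

-- outer while: one iteration per run, advancing i to the run's end k
def goB (movelist : List String) (n : Nat) (i : Nat) : List String :=
  if _h : i < n then
    let move := movelist.getD i ""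
    let k := runLen movelist n move (i + 1)
    (take3 move ++ istr ((k - i : Nat) : Int)) :: goB movelist n k
  else []
termination_by n - i
decreasing_by
  have := runLen_ge movelist n (movelist.getD i "") (i + 1)
  omega

def dedupemovelist_alt (movelist : List String) : List String :=
  goB movelist movelist.length 0

-- ===== PRECONDITION & SPEC =====
-- Pre_ excludes only the empty list, on which A raises IndexError (movelist[0]).
def Pre_dedupemovelist (movelist : List String) : Prop := movelist ≠ []
instance (movelist : List String) : Decidable (Pre_dedupemovelist movelist) := by
  unfold Pre_dedupemovelist; infer_instance
def pvWitness_dedupemovelist : List String := ["U12", "U12", "R'"]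

def Spec_dedupemovelist (movelist : List String) (out : List String) : Prop :=
  out = dedupemovelist_alt movelist
instance (movelist : List String) (out : List String) : Decidable (Spec_dedupemovelist movelist out) := by
  unfold Spec_dedupemovelist; infer_instance

-- ===== CLAIM (what is proved, stated in full; the proofs are below) =====
def Claim_equal_dedupemovelist : Prop :=
  ∀ (movelist : List String), Dom_dedupemovelist movelist → Pre_dedupemovelist movelist →
    Spec_dedupemovelist movelist (dedupemovelist movelist)

-- ===== LEMMAS AND PROOFS =====

-- length of the leading run of m in xs
def leadCount (m : String) (xs : List String) : Nat :=
  (xs.takeWhile (fun x => x == m)).length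

theorem runLen_eq (rest : List String) (move : String) (k : Nat) :
    runLen rest rest.length move k = k + leadCount move (rest.drop k) := by
  unfold runLen
  split
  · next h =>
    obtain ⟨hk, hb⟩ := h
    rw [runLen_eq rest move (k + 1)]
    rw [List.getD_eq_getElem?_getD, List.getElem?_eq_getElem hk, Option.getD_some] at hb
    rw [List.drop_eq_getElem_cons hk]
    simp only [leadCount, List.takeWhile_cons, hb, if_pos, List.length_cons]
    omega
  · next h =>
    rcases Nat.lt_or_ge k rest.length with hk | hk
    · have hne : (rest[k]'hk == move) = false := by
        rcases Bool.eq_false_or_eq_true (rest[k]'hk == move) with hb | hb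
        · refine absurd ⟨hk, ?_⟩ h
          rw [List.getD_eq_getElem?_getD, List.getElem?_eq_getElem hk, Option.getD_some]
          exact hb
        · exact hb
      rw [List.drop_eq_getElem_cons hk]
      simp [leadCount, hne]
    · rw [List.drop_eq_nil_of_le hk]
      simp [leadCount]
termination_by rest.length - k
decreasing_by omega

-- structural view of B's outer loop, used only by the proofs
def gOld : List String → List String
  | [] => []
  | y :: ys =>
      (take3 y ++ istr ((1 + leadCount y ys : Nat) : Int)) :: gOld (ys.drop (leadCount y ys))
termination_by xs => xs.length
decreasing_by
  simp only [List.length_drop, List.length_cons]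
  omega

theorem goB_eq_gOld (movelist : List String) (i : Nat) :
    goB movelist movelist.length i = gOld (movelist.drop i) := by
  unfold goB
  split
  · next h =>
    have hg : movelist.getD i "" = movelist[i]'h := by
      rw [List.getD_eq_getElem?_getD, List.getElem?_eq_getElem h, Option.getD_some]
    have hk : runLen movelist movelist.length (movelist.getD i "") (i + 1) =
        (i + 1) + leadCount (movelist.getD i "") (movelist.drop (i + 1)) :=
      runLen_eq movelist (movelist.getD i "") (i + 1)
    have hge := runLen_ge movelist movelist.length (movelist.getD i "") (i + 1)
    show (take3 (movelist.getD i "") ++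
        istr ((runLen movelist movelist.length (movelist.getD i "") (i + 1) - i : Nat) : Int)) ::
        goB movelist movelist.length (runLen movelist movelist.length (movelist.getD i "") (i + 1)) =
      gOld (movelist.drop i)
    rw [goB_eq_gOld movelist _]
    rw [List.drop_eq_getElem_cons h, gOld]
    rw [← hg, hk]
    have h1 : (i + 1) + leadCount (movelist.getD i "") (movelist.drop (i + 1)) - i =
        1 + leadCount (movelist.getD i "") (movelist.drop (i + 1)) := by omega
    rw [h1, List.drop_drop]
  · next h =>
    rw [List.drop_eq_nil_of_le (by omega), gOld]
termination_by movelist.length - i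
decreasing_by
  have := runLen_ge movelist movelist.length (movelist.getD i "") (i + 1)
  omega


-- A's tail behaviour: run-length emission with end-of-list flush
def emitE (m : String) (c : Int) : List String → List String
  | [] => [take3 m ++ istr c]
  | y :: ys => if y == m then emitE m (c + 1) ys else (take3 m ++ istr c) :: emitE y 1 ys

theorem emitE_eq_gOld (xs : List String) : ∀ (m : String) (c : Int),
    emitE m c xs = (take3 m ++ istr (c + (leadCount m xs : Nat))) :: gOld (xs.drop (leadCount m xs)) := by
  induction xs with
  | nil => intro m c; simp [emitE, leadCount, gOld]
  | cons y ys ih =>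
    intro m c
    rw [emitE]
    by_cases h : (y == m) = true
    · rw [if_pos h, ih]
      have hm : y = m := by simpa using h
      subst hm
      have hl : leadCount y (y :: ys) = 1 + leadCount y ys := by
        simp [leadCount]
        omega
      rw [hl]
      have : c + 1 + (leadCount y ys : Nat) = c + ((1 + leadCount y ys : Nat) : Int) := by
        push_cast; ring
      rw [this]
      rw [Nat.add_comm 1 (leadCount y ys), List.drop_succ_cons]
    · rw [if_neg h]
      have hl : leadCount m (y :: ys) = 0 := by
        simp [leadCount, h]
      rw [hl]
      simp only [List.drop_zero, Nat.cast_zero, add_zero]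
      rw [gOld, ih y 1]
      norm_num

-- The fold lemma: running A's loop on the remaining suffix xs from state (c, acc, m, i)
-- with i + xs.length = len appends exactly emitA m c xs.
def emitA (m : String) (c : Int) : List String → List String
  | [] => []
  | y :: ys =>
      if y == m then
        (if ys.isEmpty then [take3 m ++ istr (c + 1)] else emitA m (c + 1) ys)
      else
        (take3 m ++ istr c) ::
          (if ys.isEmpty then [take3 y ++ istr 1] else emitA y 1 ys)

theorem emitA_eq_emitE (xs : List String) : ∀ (m : String) (c : Int), xs ≠ [] →
    emitA m c xs = emitE m c xs := by
  induction xs with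
  | nil => intro m c h; exact absurd rfl h
  | cons y ys ih =>
    intro m c _
    rw [emitA, emitE]
    cases ys with
    | nil => by_cases h : (y == m) = true <;> simp [h, emitE]
    | cons z zs =>
      by_cases h : (y == m) = true <;>
        simp [h, ih _ _ (by simp : z :: zs ≠ [])]

theorem foldA_emit (len : Nat) (xs : List String) : ∀ (c : Int) (acc : List String) (m : String) (i : Nat),
    i + xs.length = len →
    (xs.foldl (stepA len) (c, acc, m, i)).2.1 = acc ++ emitA m c xs := by
  induction xs with
  | nil => intro c acc m i _; simp [emitA]
  | cons y ys ih =>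
    intro c acc m i hlen
    have hine : i ≠ len := by simp only [List.length_cons] at hlen; omega
    rw [List.foldl_cons, emitA]
    cases ys with
    | nil =>
      have hi1 : i + 1 = len := by simp only [List.length_cons, List.length_nil] at hlen; omega
      by_cases h : (y == m) = true
      · have hm : y = m := by simpa using h
        subst hm
        simp [stepA, hi1]
      · simp [stepA, h, hi1, hine]
    | cons z zs =>
      have hi1 : ¬ (i + 1 = len) := by simp only [List.length_cons] at hlen; omega
      by_cases h : (y == m) = true
      · have hm : y = m := by simpa using h
        subst hm
        have hs : stepA len (c, acc, y, i) y = (c + 1, acc, y, i + 1) := by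
          simp [stepA, hi1]
        rw [hs]
        simpa using ih (c + 1) acc y (i + 1)
          (by simp only [List.length_cons] at hlen ⊢; omega)
      · have hs : stepA len (c, acc, m, i) y =
            (1, acc ++ [take3 m ++ istr c], y, i + 1) := by
          simp [stepA, h, hi1, hine]
        rw [hs, if_neg h]
        have := ih 1 (acc ++ [take3 m ++ istr c]) y (i + 1)
          (by simp only [List.length_cons] at hlen ⊢; omega)
        simpa using this

-- ===== VERDICT (by name: the statement is the Claim_ definition above) =====
theorem dedupemovelist_spec : Claim_equal_dedupemovelist := by
  intro movelist _ hpre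
  unfold Spec_dedupemovelist
  cases movelist with
  | nil => exact absurd rfl hpre
  | cons m rest =>
    unfold dedupemovelist dedupemovelist_alt
    simp only [List.headD_cons]
    rw [foldA_emit _ _ 0 [] m 0 (by simp)]
    have h1 : emitA m 0 (m :: rest) = emitE m 0 (m :: rest) :=
      emitA_eq_emitE _ _ _ (by simp)
    rw [List.nil_append, h1, emitE, if_pos (by simp), emitE_eq_gOld,
      goB_eq_gOld, List.drop_zero, gOld]
    norm_num
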